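-- pv_equiv track=rewrite | github.com/QitaoXu/Lintcode | interviews/A/OA2/kSubStringWithK-1DifferentChars.py | KSubstring
-- ===== SOURCE A (Python) =====
-- def KSubstring(stringIn, K):
--     # Write your code here
--     if not stringIn or (K - 1) > len(stringIn):
--         return 0
--
--     letter_to_count = {}
--     string = stringIn
--     found = set()
--     k = K
--
--     for i in range(k):
--
--         letter_to_count[string[i]] = letter_to_count.get(string[i], 0) + 1
--
--     if len(letter_to_count) == k - 1:
--         found.add(string[: k])
--
--     for start in range(1, len(string) - k + 1):
--
--         end = start +  k - 1
--
--         letter_to_count[string[end]] = letter_to_count.get(string[end], 0) + 1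
--         letter_to_count[string[start - 1]] -= 1
--
--         if letter_to_count[string[start - 1]] == 0:
--             del letter_to_count[string[start - 1]]
--
--         if len(letter_to_count) == k - 1:
--             found.add(string[start : end + 1])
--
--     return len(found), sorted(list(found))
-- ===== SOURCE B (Python) =====
-- def KSubstring(stringIn, K):
--     if not stringIn or (K - 1) > len(stringIn):
--         return 0
--     found = set()
--     for start in range(len(stringIn) - K + 1):
--         sub = stringIn[start:start + K]
--         if len(set(sub)) == K - 1:
--             found.add(sub)
--     return len(found), sorted(found)
-- ===== Notes on version B (the rewrite author's own statement) =====
-- stated objective: simpler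
-- what changed: B drops A's incrementally-maintained sliding count dict and instead builds a fresh character set per window slice, testing len(set(window)) == K-1 directly in one plain loop.
-- outside the precondition, e.g. on KSubstring('', 2): A returns 0, B returns 0; on KSubstring('ab', 5): A returns 0, B returns 0
import Mathlib
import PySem

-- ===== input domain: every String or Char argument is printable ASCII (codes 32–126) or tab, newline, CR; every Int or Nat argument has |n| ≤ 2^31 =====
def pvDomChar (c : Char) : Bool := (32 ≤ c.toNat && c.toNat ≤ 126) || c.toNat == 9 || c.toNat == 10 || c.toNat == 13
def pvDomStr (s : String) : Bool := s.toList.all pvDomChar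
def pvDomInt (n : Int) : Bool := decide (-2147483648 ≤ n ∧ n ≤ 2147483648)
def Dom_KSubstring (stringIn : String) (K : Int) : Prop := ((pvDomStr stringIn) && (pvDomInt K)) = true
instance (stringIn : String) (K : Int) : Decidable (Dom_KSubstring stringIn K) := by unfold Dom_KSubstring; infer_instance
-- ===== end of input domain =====

-- B replaces A's incrementally maintained sliding count dict by a fresh per-window
-- character set, testing len(set(window)) == K-1 directly; objective: simpler.

-- ===== PORT A =====
-- helper: the initial fill loop 'for i in range(k): letter_to_count[string[i]] += 1'
def KSubAFill (s : List Char) (K : Int) : PySem.Dict Char Int :=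
  (PySem.List.pyRange 0 K 1).foldl
    (fun d i => d.insert (PySem.List.pyGetD s i ' ') (d.getD (PySem.List.pyGetD s i ' ') 0 + 1))
    PySem.Dict.empty

-- helper: the body of A's main 'for start in range(1, len(string) - k + 1)' loop
def KSubABody (s : List Char) (K : Int)
    (st : PySem.Dict Char Int × PySem.Set String) (start : Int) :
    PySem.Dict Char Int × PySem.Set String :=
  let d := st.1
  let «end» := start + K - 1
  let cNew := PySem.List.pyGetD s «end» ' '                 -- string[end]; in range under Pre_
  let d1 := d.insert cNew (d.getD cNew 0 + 1)
  let cOld := PySem.List.pyGetD s (start - 1) ' '           -- string[start-1]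
  let d2 := d1.insert cOld (d1.getD cOld 0 - 1)             -- letter_to_count[..] -= 1 (key present under Pre_)
  let d3 := if d2.getD cOld 0 = 0 then d2.erase cOld else d2
  let f := if (d3.size : Int) = K - 1 then
      PySem.Set.add st.2 (String.ofList (PySem.List.slice s (some start) (some («end» + 1))))
    else st.2
  (d3, f)

def KSubstring (stringIn : String) (K : Int) : Int × List String :=
  let s := stringIn.toList
  -- Python returns the bare int 0 on this guard (not a pair); those inputs are outside Pre_
  if s = [] ∨ K - 1 > (s.length : Int) then (0, [])
  else
    let letterToCount := KSubAFill s K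
    let found : PySem.Set String :=
      if (letterToCount.size : Int) = K - 1 then
        PySem.Set.add PySem.Set.empty (String.ofList (PySem.List.slice s none (some K)))
      else PySem.Set.empty
    let res := (PySem.List.pyRange 1 ((s.length : Int) - K + 1) 1).foldl
      (KSubABody s K) (letterToCount, found)
    ((res.2.length : Int), PySem.List.sorted res.2 (fun x => x) false)

-- ===== PORT B =====
-- helper: the body of B's single 'for start in range(len(stringIn) - K + 1)' loop
def KSubBBody (s : List Char) (K : Int) (f : PySem.Set String) (start : Int) :
    PySem.Set String :=
  let sub := PySem.List.slice s (some start) (some (start + K))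
  if ((PySem.Set.ofList sub).length : Int) = K - 1 then
    PySem.Set.add f (String.ofList sub)
  else f

def KSubstring_alt (stringIn : String) (K : Int) : Int × List String :=
  let s := stringIn.toList
  if s = [] ∨ K - 1 > (s.length : Int) then (0, [])
  else
    let found := (PySem.List.pyRange 0 ((s.length : Int) - K + 1) 1).foldl
      (KSubBBody s K) PySem.Set.empty
    ((found.length : Int), PySem.List.sorted found (fun x => x) false)

-- ===== PRECONDITION & SPEC =====
-- Pre_ excludes: the guard branch (empty string, or K > len+1), where Python A returns the
-- bare int 0 — not a value of the pair type; and nonempty strings with K < 0 or K = len+1,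
-- where A raises (KeyError / IndexError).
def Pre_KSubstring (stringIn : String) (K : Int) : Prop :=
  stringIn.toList ≠ [] ∧ 0 ≤ K ∧ K ≤ (stringIn.toList.length : Int)
instance (stringIn : String) (K : Int) : Decidable (Pre_KSubstring stringIn K) := by
  unfold Pre_KSubstring; infer_instance

def pvWitness_KSubstring : String × Int := ("aabab", 3)

def Spec_KSubstring (stringIn : String) (K : Int) (out : Int × List String) : Prop :=
  out = KSubstring_alt stringIn K
instance (stringIn : String) (K : Int) (out : Int × List String) :
    Decidable (Spec_KSubstring stringIn K out) := by unfold Spec_KSubstring; infer_instance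

-- ===== CLAIM (what is proved, stated in full; the proofs are below) =====
def Claim_equal_KSubstring : Prop := ∀ (stringIn : String) (K : Int),
  Dom_KSubstring stringIn K → Pre_KSubstring stringIn K →
  Spec_KSubstring stringIn K (KSubstring stringIn K)

-- ===== LEMMAS AND PROOFS =====

-- the window of length k starting at j
def KWin (s : List Char) (k j : Nat) : List Char := (s.drop j).take k

-- A's dict holds exactly the positive character counts of the current window
def CntInv (d : PySem.Dict Char Int) (w : List Char) : Prop :=
  d.keys.Nodup ∧ ∀ c : Char, d.get? c = if w.count c = 0 then none else some ((w.count c : Int))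

lemma mem_keys_iff_get? (d : PySem.Dict Char Int) (c : Char) :
    c ∈ d.keys ↔ (d.get? c).isSome := by
  simp only [PySem.Dict.keys, PySem.Dict.get?, Option.isSome_map, List.find?_isSome,
    List.mem_map, beq_iff_eq]

lemma size_eq_of_inv {d : PySem.Dict Char Int} {w : List Char} (h : CntInv d w) :
    d.size = (PySem.Set.ofList w).length := by
  obtain ⟨hnd, hget⟩ := h
  have hperm : d.keys.Perm (PySem.Set.ofList w) := by
    rw [List.perm_ext_iff_of_nodup hnd (PySem.Set.nodup_ofList w)]
    intro c
    rw [mem_keys_iff_get?, hget c, PySem.Set.mem_ofList]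
    by_cases h0 : w.count c = 0
    · simp [h0, List.count_eq_zero.1 h0]
    · simp [h0, List.count_pos_iff.1 (Nat.pos_of_ne_zero h0)]
  have hks : d.size = d.keys.length := by simp [PySem.Dict.size, PySem.Dict.keys]
  rw [hks, hperm.length_eq]

lemma find?_filter_ne (t : List (Char × Int)) (k k' : Char) (hk : k' ≠ k) :
    (t.filter (fun p => !(p.1 == k))).find? (fun p => p.1 == k') =
      t.find? (fun p => p.1 == k') := by
  have hkk : ¬ (k = k') := fun h => hk h.symm
  induction t with
  | nil => rfl
  | cons p t ih =>
    by_cases hpk : p.1 = k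
    · have hne : ¬ (p.1 = k') := by rw [hpk]; exact hkk
      simp [hpk, ih, hkk]
    · by_cases hpk' : p.1 = k' <;> simp [hpk, hpk', ih, hk]

lemma get?_erase (d : PySem.Dict Char Int) (k k' : Char) :
    (d.erase k).get? k' = if k' = k then none else d.get? k' := by
  by_cases hk : k' = k
  · subst hk
    simp only [PySem.Dict.erase, PySem.Dict.get?]
    rw [List.find?_eq_none.2]
    · rfl
    · intro p hp
      simp only [List.mem_filter] at hp
      simpa using hp.2
  · simp only [PySem.Dict.erase, PySem.Dict.get?, if_neg hk]
    rw [find?_filter_ne _ _ _ hk]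

lemma nodup_keys_erase (d : PySem.Dict Char Int) (k : Char) (h : d.keys.Nodup) :
    (d.erase k).keys.Nodup := by
  simp only [PySem.Dict.erase, PySem.Dict.keys] at *
  exact (List.Sublist.map Prod.fst List.filter_sublist).nodup h

lemma get?_counter (xs : List Char) (c : Char) :
    (PySem.Dict.counter xs).get? c =
      if xs.count c = 0 then none else some ((xs.count c : Int)) := by
  have hc := PySem.Dict.contains_counter xs c
  have hg := PySem.Dict.getD_counter xs c
  rw [PySem.Dict.contains_eq_isSome_get?] at hc
  rw [PySem.Dict.getD_eq_get?_getD] at hg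
  by_cases hmem : c ∈ xs
  · have hct : xs.contains c = true := by simpa using hmem
    rw [hct] at hc
    cases hval : (PySem.Dict.counter xs).get? c with
    | none => rw [hval] at hc; simp at hc
    | some v =>
      rw [hval] at hg
      simp only [Option.getD_some] at hg
      have hne : xs.count c ≠ 0 := (List.count_pos_iff.2 hmem).ne'
      simp [hne, ← hg]
  · have hcf : xs.contains c = false := by simpa using hmem
    rw [hcf] at hc
    have h0 : xs.count c = 0 := List.count_eq_zero.2 hmem
    rw [h0, if_pos rfl]
    cases hval : (PySem.Dict.counter xs).get? c with
    | none => rfl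
    | some v => rw [hval] at hc; simp at hc

lemma counter_inv (xs : List Char) : CntInv (PySem.Dict.counter xs) xs :=
  ⟨PySem.Dict.nodup_keys_counter xs, get?_counter xs⟩

lemma fill_eq_counter (s : List Char) (K : Int) (hK : 0 ≤ K) (hKn : K ≤ (s.length : Int)) :
    KSubAFill s K = PySem.Dict.counter (KWin s K.toNat 0) := by
  have htake : (KWin s K.toNat 0).length = K.toNat := by
    simp only [KWin, List.drop_zero, List.length_take]
    omega
  unfold KSubAFill
  have hcast : ((K.toNat : Nat) : Int) = K := by omega
  have hrange : PySem.List.pyRange 0 K 1 = PySem.List.pyRange 0 (PySem.List.len (KWin s K.toNat 0)) 1 := by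
    rw [PySem.List.len_eq, htake, hcast]
  rw [hrange]
  rw [PySem.List.foldl_congr_mem _ _
    (fun d i => d.insert (PySem.List.pyGetD (KWin s K.toNat 0) i ' ')
        (d.getD (PySem.List.pyGetD (KWin s K.toNat 0) i ' ') 0 + 1)) _ ?_]
  · exact (PySem.List.foldl_pyRange_zero_pyGetD (KWin s K.toNat 0) ' '
      (fun (d : PySem.Dict Char Int) x => d.insert x (d.getD x 0 + 1)) PySem.Dict.empty).trans
      (PySem.Dict.foldl_insert_getD_add_one_eq_counter (KWin s K.toNat 0))
  · intro acc x hx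
    rw [PySem.List.mem_pyRange_one] at hx
    obtain ⟨h0, h1⟩ := hx
    rw [PySem.List.len_eq, htake, hcast] at h1
    have h1' : x < ((KWin s K.toNat 0).length : Int) := by rw [htake]; omega
    have h1s : x < (s.length : Int) := by omega
    have hEq : (KWin s K.toNat 0)[x.toNat]'(by omega) = s[x.toNat]'(by omega) := by
      simp [KWin]
    show acc.insert (PySem.List.pyGetD s x ' ') (acc.getD (PySem.List.pyGetD s x ' ') 0 + 1)
        = acc.insert (PySem.List.pyGetD (KWin s K.toNat 0) x ' ')
            (acc.getD (PySem.List.pyGetD (KWin s K.toNat 0) x ' ') 0 + 1)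
    rw [PySem.List.pyGetD_eq_getElem _ _ h0 h1s, PySem.List.pyGetD_eq_getElem _ _ h0 h1', hEq]

lemma win_cons (s : List Char) (m j : Nat) (hj : 1 ≤ j) (hlen : j + (m + 1) ≤ s.length) :
    KWin s (m + 1) (j - 1) = s[j - 1]'(by omega) :: (s.drop j).take m := by
  unfold KWin
  rw [List.drop_eq_getElem_cons (by omega : j - 1 < s.length)]
  have h1 : j - 1 + 1 = j := by omega
  rw [h1, List.take_succ_cons]

lemma win_snoc (s : List Char) (m j : Nat) (hlen : j + (m + 1) ≤ s.length) :
    KWin s (m + 1) j = (s.drop j).take m ++ [s[j + m]'(by omega)] := by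
  unfold KWin
  rw [List.take_add_one, List.getElem?_drop]
  rw [List.getElem?_eq_getElem (by omega : j + m < s.length)]
  rfl

-- one sliding step of A's dict: drop one 'a' in front, add one 'b' at the back
lemma dict_step (d : PySem.Dict Char Int) (a b : Char) (mid : List Char)
    (h : CntInv d (a :: mid)) :
    CntInv (if ((d.insert b (d.getD b 0 + 1)).insert a
                  ((d.insert b (d.getD b 0 + 1)).getD a 0 - 1)).getD a 0 = 0
            then ((d.insert b (d.getD b 0 + 1)).insert a
                  ((d.insert b (d.getD b 0 + 1)).getD a 0 - 1)).erase a
            else ((d.insert b (d.getD b 0 + 1)).insert a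
                  ((d.insert b (d.getD b 0 + 1)).getD a 0 - 1)))
           (mid ++ [b]) := by
  obtain ⟨hnd, hget⟩ := h
  have hgd : ∀ c, d.getD c 0 = (((a :: mid).count c : Nat) : Int) := by
    intro c
    rw [PySem.Dict.getD_eq_get?_getD, hget c]
    by_cases h0 : (a :: mid).count c = 0
    · rw [if_pos h0, h0]; rfl
    · rw [if_neg h0]; rfl
  set d1 := d.insert b (d.getD b 0 + 1) with hd1
  set d2 := d1.insert a (d1.getD a 0 - 1) with hd2
  have hnd2 : d2.keys.Nodup :=
    PySem.Dict.nodup_keys_insert _ _ _ (PySem.Dict.nodup_keys_insert _ _ _ hnd)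
  have hget1 : ∀ c, d1.get? c = if c = b then some (((a :: mid).count b : Int) + 1) else d.get? c := by
    intro c; rw [hd1, PySem.Dict.get?_insert, hgd b]
  have hgd1a : d1.getD a 0 = if a = b then ((a :: mid).count b : Int) + 1 else ((a :: mid).count a : Int) := by
    rw [PySem.Dict.getD_eq_get?_getD, hget1 a]
    by_cases hab : a = b
    · rw [if_pos hab, if_pos hab, Option.getD_some]
    · rw [if_neg hab, if_neg hab, ← PySem.Dict.getD_eq_get?_getD, hgd a]
  have hget2 : ∀ c, d2.get? c = if c = a then some (d1.getD a 0 - 1) else d1.get? c := by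
    intro c; rw [hd2, PySem.Dict.get?_insert]
  have hgd2a : d2.getD a 0 = d1.getD a 0 - 1 := by
    rw [PySem.Dict.getD_eq_get?_getD, hget2 a, if_pos rfl, Option.getD_some]
  have hca : 1 ≤ (a :: mid).count a := by simp
  have hcountp : ∀ c, (a :: mid).count c = (if c = a then 1 else 0) + mid.count c := by
    intro c
    by_cases hc : c = a
    · rw [hc, List.count_cons_self, if_pos rfl]; omega
    · rw [List.count_cons_of_ne (fun h => hc h.symm), if_neg hc]; omega
  have hcountc : ∀ c, (mid ++ [b]).count c = mid.count c + (if c = b then 1 else 0) := by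
    intro c
    by_cases hc : c = b
    · rw [hc, if_pos rfl]; simp
    · rw [if_neg hc]
      have : ¬ b = c := fun h => hc h.symm
      simp [this]
  by_cases hab : a = b
  · -- incoming char equals outgoing char: net count unchanged, no erase
    have hcab : (a :: mid).count b = (a :: mid).count a := by rw [hab]
    have hne : d2.getD a 0 ≠ 0 := by
      rw [hgd2a, hgd1a, if_pos hab, hcab]; omega
    rw [if_neg hne]
    refine ⟨hnd2, fun c => ?_⟩
    rw [hget2 c]
    by_cases hc : c = a
    · have hcb : c = b := hab ▸ hc
      have h2 : (mid ++ [b]).count c ≠ 0 := by rw [hcountc c, if_pos hcb]; omega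
      rw [if_pos hc, hgd1a, if_pos hab, if_neg h2]
      congr 1
      have e2 := hcountc c
      rw [if_pos hcb] at e2
      have e1 : (a :: mid).count b = 1 + mid.count c := by
        rw [hcountp b, if_pos hab.symm, hcb]
      omega
    · have hcb : ¬ c = b := fun h => hc (h.trans hab.symm)
      rw [if_neg hc, hget1 c, if_neg hcb, hget c]
      have h1 : (mid ++ [b]).count c = (a :: mid).count c := by
        rw [hcountc c, hcountp c, if_neg hc, if_neg hcb]; omega
      rw [h1]
  · have hcb : (a :: mid).count b = mid.count b := by
      rw [hcountp b, if_neg (fun h => hab h.symm)]; omega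
    have hgd1a' : d1.getD a 0 = ((a :: mid).count a : Int) := by rw [hgd1a, if_neg hab]
    have hcaa : (a :: mid).count a = 1 + mid.count a := by rw [hcountp a, if_pos rfl]
    by_cases hone : mid.count a = 0
    · -- front count drops to zero: key erased
      have hz : d2.getD a 0 = 0 := by rw [hgd2a, hgd1a', hcaa, hone]; simp
      rw [if_pos hz]
      refine ⟨nodup_keys_erase _ _ hnd2, fun c => ?_⟩
      rw [get?_erase]
      by_cases hc : c = a
      · have hcb' : ¬ c = b := fun h => hab (hc.symm.trans h)
        have h0 : (mid ++ [b]).count c = 0 := by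
          rw [hcountc c, if_neg hcb', hc, hone]
        rw [if_pos hc, h0, if_pos rfl]
      · rw [if_neg hc, hget2 c, if_neg hc, hget1 c]
        by_cases hcb' : c = b
        · have h2 : (mid ++ [b]).count c ≠ 0 := by rw [hcountc c, if_pos hcb']; omega
          rw [if_pos hcb', if_neg h2]
          congr 1
          have e1 := hcountc c
          rw [if_pos hcb'] at e1
          have e2 : mid.count b = mid.count c := by rw [hcb']
          omega
        · rw [if_neg hcb', hget c]
          have h1 : (mid ++ [b]).count c = (a :: mid).count c := by
            rw [hcountc c, hcountp c, if_neg hc, if_neg hcb']; omega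
          rw [h1]
    · -- front count stays positive
      have hz : d2.getD a 0 ≠ 0 := by rw [hgd2a, hgd1a', hcaa]; omega
      rw [if_neg hz]
      refine ⟨hnd2, fun c => ?_⟩
      rw [hget2 c]
      by_cases hc : c = a
      · have hcb' : ¬ c = b := fun h => hab (hc.symm.trans h)
        have h2 : (mid ++ [b]).count c ≠ 0 := by
          rw [hcountc c, if_neg hcb', hc]; omega
        rw [if_pos hc, hgd1a', if_neg h2]
        congr 1
        have e1 := hcountc c
        rw [if_neg hcb'] at e1
        have e2 : mid.count a = mid.count c := by rw [hc]
        omega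
      · rw [if_neg hc, hget1 c]
        by_cases hcb' : c = b
        · have h2 : (mid ++ [b]).count c ≠ 0 := by rw [hcountc c, if_pos hcb']; omega
          rw [if_pos hcb', if_neg h2]
          congr 1
          have e1 := hcountc c
          rw [if_pos hcb'] at e1
          have e2 : mid.count b = mid.count c := by rw [hcb']
          omega
        · rw [if_neg hcb', hget c]
          have h1 : (mid ++ [b]).count c = (a :: mid).count c := by
            rw [hcountc c, hcountp c, if_neg hc, if_neg hcb']; omega
          rw [h1]

lemma step_inv (s : List Char) (K : Int) (j : Nat) (hK : 1 ≤ K)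
    (hj : 1 ≤ j) (hjk : j + K.toNat ≤ s.length)
    {d : PySem.Dict Char Int} {f : PySem.Set String}
    (h : CntInv d (KWin s K.toNat (j - 1))) :
    CntInv (KSubABody s K (d, f) (j : Int)).1 (KWin s K.toNat j) := by
  obtain ⟨m, hm⟩ : ∃ m, K.toNat = m + 1 := ⟨K.toNat - 1, by omega⟩
  rw [hm] at h ⊢
  have hNew : PySem.List.pyGetD s ((j : Int) + K - 1) ' ' = s[j + m]'(by omega) := by
    rw [PySem.List.pyGetD_eq_getElem _ _ (by omega) (by omega)]
    congr 1
    omega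
  have hOld : PySem.List.pyGetD s ((j : Int) - 1) ' ' = s[j - 1]'(by omega) := by
    rw [PySem.List.pyGetD_eq_getElem _ _ (by omega) (by omega)]
    congr 1
    omega
  rw [win_cons s m j hj (by omega)] at h
  rw [win_snoc s m j (by omega)]
  unfold KSubABody
  simp only [hNew, hOld]
  exact dict_step d _ _ _ h

lemma slice_eq_win (s : List Char) (K : Int) (j : Nat) (hK : 0 ≤ K) :
    PySem.List.slice s (some (j : Int)) (some ((j : Int) + K)) = KWin s K.toNat j := by
  rw [PySem.List.slice_toNat s (by omega) (by omega)]
  unfold KWin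
  rw [show ((j : Int)).toNat = j from by omega,
    show (((j : Int)) + K).toNat - j = K.toNat from by omega]

lemma loop_eq (s : List Char) (K : Int) (hK : 1 ≤ K) (_hKn : K ≤ (s.length : Int)) :
    ∀ (fuel : Nat) (j : Nat) (d : PySem.Dict Char Int) (f : PySem.Set String),
      1 ≤ j → ((s.length : Int) - K + 1 - j).toNat = fuel →
      CntInv d (KWin s K.toNat (j - 1)) →
      ((PySem.List.pyRange (j : Int) ((s.length : Int) - K + 1) 1).foldl (KSubABody s K) (d, f)).2 =
        (PySem.List.pyRange (j : Int) ((s.length : Int) - K + 1) 1).foldl (KSubBBody s K) f := by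
  intro fuel
  induction fuel with
  | zero =>
    intro j d f hj hfuel hinv
    rw [PySem.List.pyRange_one_eq_nil (by omega)]
    rfl
  | succ fuel ih =>
    intro j d f hj hfuel hinv
    have hjm : (j : Int) < (s.length : Int) - K + 1 := by omega
    rw [PySem.List.pyRange_one_cons hjm]
    rw [List.foldl_cons, List.foldl_cons]
    have hjk : j + K.toNat ≤ s.length := by omega
    have hstep := step_inv s K j hK hj hjk (f := f) hinv
    -- found components agree at this step
    have hslice : PySem.List.slice s (some (j : Int)) (some ((j : Int) + K - 1 + 1))
        = PySem.List.slice s (some (j : Int)) (some ((j : Int) + K)) := by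
      norm_num
    have hcond : ((KSubABody s K (d, f) (j : Int)).1.size : Int)
        = ((PySem.Set.ofList (KWin s K.toNat j)).length : Int) := by
      rw [size_eq_of_inv hstep]
    have hf : (KSubABody s K (d, f) (j : Int)).2 = KSubBBody s K f (j : Int) := by
      show (if ((KSubABody s K (d, f) (j : Int)).1.size : Int) = K - 1 then
          PySem.Set.add f (String.ofList (PySem.List.slice s (some (j : Int)) (some ((j : Int) + K - 1 + 1))))
        else f) = KSubBBody s K f (j : Int)
      rw [hcond, hslice, slice_eq_win s K j (by omega)]
      simp only [KSubBBody]
      rw [slice_eq_win s K j (by omega)]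
    have hpair : KSubABody s K (d, f) (j : Int)
        = ((KSubABody s K (d, f) (j : Int)).1, (KSubABody s K (d, f) (j : Int)).2) := rfl
    rw [hpair, hf]
    have hcast : ((j + 1 : Nat) : Int) = (j : Int) + 1 := by push_cast; ring
    have hinv' : CntInv (KSubABody s K (d, f) (j : Int)).1 (KWin s K.toNat ((j + 1) - 1)) := by
      simpa using hstep
    have := ih (j + 1) (KSubABody s K (d, f) (j : Int)).1 (KSubBBody s K f (j : Int))
      (by omega) (by omega) hinv'
    rw [hcast] at this
    exact this

lemma foldA_const (s : List Char) (K : Int) (hK : K ≤ 0) (l : List Int) :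
    ∀ st : PySem.Dict Char Int × PySem.Set String,
      (l.foldl (KSubABody s K) st).2 = st.2 := by
  induction l with
  | nil => intro st; rfl
  | cons x t ih =>
    intro st
    rw [List.foldl_cons, ih]
    show (if (((KSubABody s K st x).1.size : Int)) = K - 1 then _ else st.2) = st.2
    rw [if_neg (by have : (0 : Int) ≤ ((KSubABody s K st x).1.size : Int) := Int.natCast_nonneg _; omega)]

lemma foldB_const (s : List Char) (K : Int) (hK : K ≤ 0) (l : List Int) :
    ∀ f : PySem.Set String, l.foldl (KSubBBody s K) f = f := by
  induction l with
  | nil => intro f; rfl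
  | cons x t ih =>
    intro f
    rw [List.foldl_cons]
    have hne : ¬ (((PySem.Set.ofList (PySem.List.slice s (some x) (some (x + K)))).length : Int) = K - 1) := by
      have : (0 : Int) ≤ ((PySem.Set.ofList (PySem.List.slice s (some x) (some (x + K)))).length : Int) :=
        Int.natCast_nonneg _
      omega
    show t.foldl (KSubBBody s K) (if _ = K - 1 then _ else f) = f
    rw [if_neg hne, ih]

lemma found_eq (s : List Char) (K : Int) (hK : 0 ≤ K) (hKn : K ≤ (s.length : Int)) :
    ((PySem.List.pyRange 1 ((s.length : Int) - K + 1) 1).foldl (KSubABody s K)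
      (KSubAFill s K,
        if ((KSubAFill s K).size : Int) = K - 1 then
          PySem.Set.add PySem.Set.empty (String.ofList (PySem.List.slice s none (some K)))
        else PySem.Set.empty)).2 =
    (PySem.List.pyRange 0 ((s.length : Int) - K + 1) 1).foldl (KSubBBody s K) PySem.Set.empty := by
  by_cases hK1 : 1 ≤ K
  · have hm1 : (1 : Int) ≤ (s.length : Int) - K + 1 := by omega
    rw [PySem.List.pyRange_one_append 0 1 ((s.length : Int) - K + 1) (by omega) hm1,
      List.foldl_append]
    have h01 : PySem.List.pyRange 0 1 1 = [0] := by
      have := PySem.List.pyRange_one_singleton (a := 0)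
      simpa using this
    rw [h01]
    have hfill := fill_eq_counter s K hK hKn
    have hinv0 : CntInv (KSubAFill s K) (KWin s K.toNat 0) := hfill ▸ counter_inv _
    have hinit : (if ((KSubAFill s K).size : Int) = K - 1 then
          PySem.Set.add PySem.Set.empty (String.ofList (PySem.List.slice s none (some K)))
        else PySem.Set.empty) = List.foldl (KSubBBody s K) PySem.Set.empty [0] := by
      have hsz : (((KSubAFill s K).size : Nat) : Int)
          = ((PySem.Set.ofList (KWin s K.toNat 0)).length : Int) := by
        rw [size_eq_of_inv hinv0]
      have hsl : PySem.List.slice s (some (0 : Int)) (some ((0 : Int) + K)) = KWin s K.toNat 0 := by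
        have := slice_eq_win s K 0 hK
        simpa using this
      have hsl0 : PySem.List.slice s none (some K) = KWin s K.toNat 0 := by
        rw [← PySem.List.slice_zero_start]
        simpa using hsl
      show _ = KSubBBody s K PySem.Set.empty 0
      unfold KSubBBody
      simp only [zero_add]
      rw [hsz, hsl0]
      have hsl' : PySem.List.slice s (some (0 : Int)) (some K) = KWin s K.toNat 0 := by
        rw [PySem.List.slice_zero_start]; exact hsl0
      rw [hsl']
    rw [hinit]
    have hl := loop_eq s K hK1 hKn (((s.length : Int) - K + 1 - 1).toNat) 1
      (KSubAFill s K) (List.foldl (KSubBBody s K) PySem.Set.empty [0]) (le_refl 1) rfl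
      (by simpa using hinv0)
    simpa using hl
  · have hK0 : K ≤ 0 := by omega
    rw [foldA_const s K hK0 _ _, foldB_const s K hK0 _ _]
    rw [if_neg (by have : (0 : Int) ≤ (((KSubAFill s K).size : Nat) : Int) := Int.natCast_nonneg _; omega)]

-- ===== VERDICT (by name: the statement is the Claim_ definition above) =====
theorem KSubstring_spec : Claim_equal_KSubstring := by
  intro stringIn K _ hPre
  obtain ⟨hs, hK0, hKn⟩ := hPre
  unfold Spec_KSubstring KSubstring KSubstring_alt
  have hguard : ¬ (stringIn.toList = [] ∨ K - 1 > (stringIn.toList.length : Int)) := by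
    rw [not_or]; exact ⟨hs, by omega⟩
  simp only [hguard, if_false]
  rw [found_eq stringIn.toList K hK0 hKn]
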